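-- pv_equiv track=rewrite | github.com/Albert-Miao/playground | model_pipelines.py | stage_planner
-- ===== SOURCE A (Python) =====
-- def stage_planner(initial_e, e_per_0, num_0, num_resamples, e_per_resample, e_per_2):
--     curr_epoch = initial_e - 1
--     upstage = []
--     neuron_track = []
--     resample = []
--
--     upstage.append(curr_epoch)
--     for _i in range(num_0 - 1):
--         for _j in range(num_resamples):
--             curr_epoch += e_per_resample - 1
--             neuron_track.append(curr_epoch)
--             curr_epoch += 1
--             resample.append(curr_epoch)
--         curr_epoch += e_per_resample
--         upstage.append(curr_epoch)
--         curr_epoch += e_per_2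
--         upstage.append(curr_epoch)
--         curr_epoch += e_per_0
--         upstage.append(curr_epoch)
--
--     return upstage, neuron_track, resample
-- ===== SOURCE B (Python) =====
-- def stage_planner(initial_e, e_per_0, num_0, num_resamples, e_per_resample, e_per_2):
--     base = initial_e - 1
--     span = (num_resamples + 1) * e_per_resample + e_per_2 + e_per_0
--     neuron_track = [base + i * span + (j + 1) * e_per_resample - 1
--                     for i in range(num_0 - 1) for j in range(num_resamples)]
--     resample = [base + i * span + (j + 1) * e_per_resample
--                 for i in range(num_0 - 1) for j in range(num_resamples)]
--     upstage = [base]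
--     for i in range(num_0 - 1):
--         u = base + i * span + (num_resamples + 1) * e_per_resample
--         upstage += [u, u + e_per_2, u + e_per_2 + e_per_0]
--     return upstage, neuron_track, resample
-- ===== Notes on version B (the rewrite author's own statement) =====
-- stated objective: alternative
-- what changed: Replaces the single stateful loop threading a running curr_epoch accumulator by closed-form index arithmetic (each entry computed directly from its block/step indices via base + i*span + j*e_per_resample); Pre_ restricts to the natural domain num_resamples >= 0, since a negative resample count is outside the function's meaningful domain and A's values there (the inner loop silently skipped) are accidental.
-- outside the precondition, e.g. on stage_planner(1, 1, 2, -1, 1, 1): A returns ([0, 1, 2, 3], [], []), B returns ([0, 0, 1, 2], [], [])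
import Mathlib
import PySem

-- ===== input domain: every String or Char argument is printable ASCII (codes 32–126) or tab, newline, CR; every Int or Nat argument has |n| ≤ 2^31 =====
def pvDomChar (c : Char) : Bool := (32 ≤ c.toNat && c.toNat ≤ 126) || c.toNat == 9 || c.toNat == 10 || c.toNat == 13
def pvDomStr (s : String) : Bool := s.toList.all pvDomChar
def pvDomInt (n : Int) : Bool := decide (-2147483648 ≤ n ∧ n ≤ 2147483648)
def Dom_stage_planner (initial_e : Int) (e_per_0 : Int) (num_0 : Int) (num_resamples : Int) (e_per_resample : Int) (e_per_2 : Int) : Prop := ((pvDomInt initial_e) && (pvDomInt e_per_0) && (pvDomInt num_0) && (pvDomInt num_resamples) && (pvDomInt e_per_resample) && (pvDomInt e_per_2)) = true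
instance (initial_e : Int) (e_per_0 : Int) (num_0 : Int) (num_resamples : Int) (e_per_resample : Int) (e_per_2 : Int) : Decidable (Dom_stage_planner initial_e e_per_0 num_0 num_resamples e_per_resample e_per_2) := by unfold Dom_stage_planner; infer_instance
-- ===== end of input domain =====

-- B replaces A's single stateful loop (running curr_epoch accumulator) by closed-form
-- index arithmetic: every list entry is computed directly from its block/step indices
-- (alternative decomposition, same asymptotic cost), on the natural domain num_resamples ≥ 0.

-- ===== PORT A =====
-- inner loop body of A: curr += e_per_resample - 1; neuron_track.append(curr); curr += 1; resample.append(curr)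
def spInnerStep (e_per_resample : Int) (s : Int × List Int × List Int) : Int × List Int × List Int :=
  let c1 := s.1 + (e_per_resample - 1)
  let nt := s.2.1 ++ [c1]
  let c2 := c1 + 1
  let rs := s.2.2 ++ [c2]
  (c2, nt, rs)

-- outer loop body of A: the inner for-loop over range(num_resamples), then three 'curr += …; upstage.append(curr)' steps
def spOuterStep (e_per_0 num_resamples e_per_resample e_per_2 : Int)
    (s : Int × List Int × List Int × List Int) : Int × List Int × List Int × List Int :=
  let t := (PySem.List.pyRange 0 num_resamples 1).foldl (fun st _ => spInnerStep e_per_resample st) (s.1, s.2.2.1, s.2.2.2)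
  let c1 := t.1 + e_per_resample
  let up1 := s.2.1 ++ [c1]
  let c2 := c1 + e_per_2
  let up2 := up1 ++ [c2]
  let c3 := c2 + e_per_0
  let up3 := up2 ++ [c3]
  (c3, up3, t.2.1, t.2.2)

def stage_planner (initial_e : Int) (e_per_0 : Int) (num_0 : Int) (num_resamples : Int) (e_per_resample : Int) (e_per_2 : Int) : List Int × List Int × List Int :=
  let curr_epoch := initial_e - 1
  let upstage : List Int := [] ++ [curr_epoch]
  let fin := (PySem.List.pyRange 0 (num_0 - 1) 1).foldl
    (fun s _ => spOuterStep e_per_0 num_resamples e_per_resample e_per_2 s)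
    (curr_epoch, upstage, ([] : List Int), ([] : List Int))
  (fin.2.1, fin.2.2.1, fin.2.2.2)

-- ===== PORT B =====
def stage_planner_alt (initial_e : Int) (e_per_0 : Int) (num_0 : Int) (num_resamples : Int) (e_per_resample : Int) (e_per_2 : Int) : List Int × List Int × List Int :=
  let base := initial_e - 1
  let span := (num_resamples + 1) * e_per_resample + e_per_2 + e_per_0
  let neuron_track := (PySem.List.pyRange 0 (num_0 - 1) 1).flatMap (fun i =>
    (PySem.List.pyRange 0 num_resamples 1).map (fun j => base + i * span + (j + 1) * e_per_resample - 1))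
  let resample := (PySem.List.pyRange 0 (num_0 - 1) 1).flatMap (fun i =>
    (PySem.List.pyRange 0 num_resamples 1).map (fun j => base + i * span + (j + 1) * e_per_resample))
  -- Python's 'upstage = [base]' then 'upstage += [u, u+e2, u+e2+e0]' per block
  let upstage := [base] ++ (PySem.List.pyRange 0 (num_0 - 1) 1).flatMap (fun i =>
    let u := base + i * span + (num_resamples + 1) * e_per_resample
    [u, u + e_per_2, u + e_per_2 + e_per_0])
  (upstage, neuron_track, resample)

-- ===== PRECONDITION & SPEC =====
-- Pre_ restricts to the function's natural domain: a resample count is a count, so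
-- num_resamples ≥ 0; for negative num_resamples A's values (inner loop silently skipped
-- while the block arithmetic still runs) are an accident of its implementation.
def Pre_stage_planner (initial_e : Int) (e_per_0 : Int) (num_0 : Int) (num_resamples : Int) (e_per_resample : Int) (e_per_2 : Int) : Prop := 0 ≤ num_resamples
instance (initial_e : Int) (e_per_0 : Int) (num_0 : Int) (num_resamples : Int) (e_per_resample : Int) (e_per_2 : Int) : Decidable (Pre_stage_planner initial_e e_per_0 num_0 num_resamples e_per_resample e_per_2) := by unfold Pre_stage_planner; infer_instance
def pvWitness_stage_planner : Int × Int × Int × Int × Int × Int := (5, 2, 3, 2, 4, 3)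

def Spec_stage_planner (initial_e : Int) (e_per_0 : Int) (num_0 : Int) (num_resamples : Int) (e_per_resample : Int) (e_per_2 : Int) (out : List Int × List Int × List Int) : Prop := out = stage_planner_alt initial_e e_per_0 num_0 num_resamples e_per_resample e_per_2
instance (initial_e : Int) (e_per_0 : Int) (num_0 : Int) (num_resamples : Int) (e_per_resample : Int) (e_per_2 : Int) (out : List Int × List Int × List Int) : Decidable (Spec_stage_planner initial_e e_per_0 num_0 num_resamples e_per_resample e_per_2 out) := by unfold Spec_stage_planner; infer_instance

-- ===== CLAIM (what is proved, stated in full; the proofs are below) =====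
def Claim_equal_stage_planner : Prop := ∀ (initial_e : Int) (e_per_0 : Int) (num_0 : Int) (num_resamples : Int) (e_per_resample : Int) (e_per_2 : Int), Dom_stage_planner initial_e e_per_0 num_0 num_resamples e_per_resample e_per_2 → Pre_stage_planner initial_e e_per_0 num_0 num_resamples e_per_resample e_per_2 → Spec_stage_planner initial_e e_per_0 num_0 num_resamples e_per_resample e_per_2 (stage_planner initial_e e_per_0 num_0 num_resamples e_per_resample e_per_2)

-- ===== LEMMAS AND PROOFS =====

lemma flatMap_congr_nat {α : Type} (l : List Nat) (f g : Nat → List α) (h : ∀ i ∈ l, f i = g i) :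
    l.flatMap f = l.flatMap g := by
  induction l with
  | nil => rfl
  | cons x xs ih =>
    simp only [List.flatMap_cons, h x (List.mem_cons_self), ih (fun i hi => h i (List.mem_cons_of_mem _ hi))]

-- Closed form of A's inner fold, from an arbitrary state.
lemma spInner_fold (er : Int) : ∀ (l : List Int) (c : Int) (nt rs : List Int),
    l.foldl (fun st _ => spInnerStep er st) (c, nt, rs)
      = (c + l.length * er,
         nt ++ (List.range l.length).map (fun j : Nat => c + ((j : Int) + 1) * er - 1),
         rs ++ (List.range l.length).map (fun j : Nat => c + ((j : Int) + 1) * er)) := by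
  intro l
  induction l with
  | nil => intro c nt rs; simp
  | cons x xs ih =>
    intro c nt rs
    rw [List.foldl_cons,
      show spInnerStep er (c, nt, rs) = (c + (er - 1) + 1, nt ++ [c + (er - 1)], rs ++ [c + (er - 1) + 1]) from rfl,
      ih]
    simp only [List.length_cons, List.range_succ_eq_map, List.map_cons, List.map_map,
      List.append_assoc, List.singleton_append]
    refine Prod.ext (by push_cast; ring) (Prod.ext ?_ ?_) <;>
    · simp only []
      congr 2
      · push_cast; ring
      · refine List.map_congr_left ?_
        intro j _
        simp only [Function.comp_apply, Nat.succ_eq_add_one]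
        push_cast; ring

-- Closed form of one outer-loop iteration of A.
lemma spOuterStep_eq (e0 nr er e2 c : Int) (up nt rs : List Int) :
    spOuterStep e0 nr er e2 (c, up, nt, rs)
      = (c + ((nr.toNat : Int) * er + er + e2 + e0),
         up ++ [c + ((nr.toNat : Int) + 1) * er,
                c + ((nr.toNat : Int) + 1) * er + e2,
                c + ((nr.toNat : Int) + 1) * er + e2 + e0],
         nt ++ (List.range nr.toNat).map (fun j : Nat => c + ((j : Int) + 1) * er - 1),
         rs ++ (List.range nr.toNat).map (fun j : Nat => c + ((j : Int) + 1) * er)) := by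
  show (_, _, _, _) = _
  rw [spInner_fold er (PySem.List.pyRange 0 nr 1) c nt rs]
  simp only [PySem.List.length_pyRange_one, Int.sub_zero, List.append_assoc, List.cons_append,
    List.nil_append]
  ring_nf

-- Closed form of A's outer fold, from an arbitrary state.
lemma spOuter_fold (e0 nr er e2 : Int) :
    ∀ (l : List Int) (c : Int) (up nt rs : List Int),
    l.foldl (fun s _ => spOuterStep e0 nr er e2 s) (c, up, nt, rs)
      = (c + l.length * ((nr.toNat : Int) * er + er + e2 + e0),
         up ++ (List.range l.length).flatMap (fun i : Nat =>
           [c + (i : Int) * ((nr.toNat : Int) * er + er + e2 + e0) + ((nr.toNat : Int) + 1) * er,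
            c + (i : Int) * ((nr.toNat : Int) * er + er + e2 + e0) + ((nr.toNat : Int) + 1) * er + e2,
            c + (i : Int) * ((nr.toNat : Int) * er + er + e2 + e0) + ((nr.toNat : Int) + 1) * er + e2 + e0]),
         nt ++ (List.range l.length).flatMap (fun i : Nat =>
           (List.range nr.toNat).map (fun j : Nat => c + (i : Int) * ((nr.toNat : Int) * er + er + e2 + e0) + ((j : Int) + 1) * er - 1)),
         rs ++ (List.range l.length).flatMap (fun i : Nat =>
           (List.range nr.toNat).map (fun j : Nat => c + (i : Int) * ((nr.toNat : Int) * er + er + e2 + e0) + ((j : Int) + 1) * er))) := by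
  intro l
  induction l with
  | nil => intro c up nt rs; simp
  | cons x xs ih =>
    intro c up nt rs
    rw [List.foldl_cons, spOuterStep_eq, ih]
    simp only [List.length_cons, List.range_succ_eq_map, List.flatMap_cons, List.flatMap_map,
      List.append_assoc, Nat.cast_zero]
    simp only [Prod.mk.injEq]
    refine ⟨by push_cast; ring, ?_, ?_, ?_⟩
    · congr 1
      congr 1
      · simp only [List.cons.injEq, and_true]
        exact ⟨by ring, by ring, by ring⟩
      · refine flatMap_congr_nat _ _ _ (fun i _ => ?_)
        simp only [List.cons.injEq, and_true]
        exact ⟨by push_cast; ring, by push_cast; ring, by push_cast; ring⟩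
    all_goals
      congr 1
      congr 1
      · exact List.map_congr_left (fun j _ => by ring)
      · refine flatMap_congr_nat _ _ _ (fun i _ => ?_)
        exact List.map_congr_left (fun j _ => by push_cast; ring)

-- ===== VERDICT (by name: the statement is the Claim_ definition above) =====
theorem stage_planner_spec : Claim_equal_stage_planner := by
  intro ie e0 n0 nr er e2 _ hpre
  unfold Spec_stage_planner
  simp only [stage_planner, stage_planner_alt]
  rw [spOuter_fold]
  rw [Int.toNat_of_nonneg hpre]
  simp only [PySem.List.pyRange_one, Int.sub_zero, List.flatMap_map, List.map_map,
    List.nil_append, List.singleton_append, Function.comp_def, zero_add,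
    List.length_map, List.length_range]
  simp only [Prod.mk.injEq, and_true]
  constructor
  · congr 1
    refine flatMap_congr_nat _ _ _ (fun i _ => ?_)
    simp only [List.cons.injEq, and_true]
    exact ⟨by ring, by ring, by ring⟩
  · constructor <;>
    · refine flatMap_congr_nat _ _ _ (fun i _ => ?_)
      exact List.map_congr_left (fun j _ => by ring)
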